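-- pv_equiv track=rewrite | github.com/thechampsolok2023-hub/bot-monitoring-cabang | main.py | get_years
-- ===== SOURCE A (Python) =====
-- COL_YEAR = "TAHUN"
--
-- def get_years(rows):
--     years = {
--         str(row.get(COL_YEAR, "")).strip()
--         for row in rows
--         if str(row.get(COL_YEAR, "")).strip()
--     }
--
--     def sort_key(x):
--         return (0, int(x)) if x.isdigit() else (1, x)
--
--     return sorted(years, key=sort_key)
-- ===== SOURCE B (Python) =====
-- COL_YEAR = "TAHUN"
--
-- def get_years(rows):
--     def key(x):
--         return (0, int(x)) if x.isdigit() else (1, x)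
--     out = []  # kept sorted by key and duplicate-free, built by online insertion
--     for row in rows:
--         y = str(row.get(COL_YEAR, "")).strip()
--         if not y:
--             continue
--         i = 0
--         while i < len(out) and key(out[i]) < key(y):
--             i += 1
--         if i < len(out) and out[i] == y:
--             continue
--         out.insert(i, y)
--     return out
-- ===== Notes on version B (the rewrite author's own statement) =====
-- stated objective: alternative
-- what changed: B builds no set and calls no sort: it makes a single online pass over the rows, inserting each stripped year into an accumulator list kept sorted by the key and duplicate-free (a scan finds the insertion point, skips if the element is already there), where A collects a set comprehension and then runs one keyed sort.
-- outside the precondition, e.g. on get_years([{'TAHUN': '07'}, {'TAHUN': '7'}]): A returns ['7', '07'], B returns ['7', '07']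
import Mathlib
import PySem

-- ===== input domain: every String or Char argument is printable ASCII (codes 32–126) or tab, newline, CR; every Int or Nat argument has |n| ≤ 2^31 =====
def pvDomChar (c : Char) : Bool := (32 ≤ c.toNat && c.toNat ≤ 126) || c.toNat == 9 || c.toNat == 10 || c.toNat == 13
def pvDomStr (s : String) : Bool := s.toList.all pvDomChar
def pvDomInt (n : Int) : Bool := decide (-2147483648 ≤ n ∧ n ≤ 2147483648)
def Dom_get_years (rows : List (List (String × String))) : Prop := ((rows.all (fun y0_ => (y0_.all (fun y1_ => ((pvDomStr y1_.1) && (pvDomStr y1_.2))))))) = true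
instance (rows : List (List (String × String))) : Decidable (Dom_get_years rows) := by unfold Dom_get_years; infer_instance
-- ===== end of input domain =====

-- B replaces A's set comprehension plus one keyed sort by a single online pass that
-- inserts each year into a sorted duplicate-free accumulator; return-value equivalence only.

-- ===== PORT A =====
-- the stripped "TAHUN" value of a row (str(...) is the identity: the values are strings)
def pvYearOf (row : List (String × String)) : String :=
  PySem.Str.strip ((PySem.Dict.mk row).getD "TAHUN" "")

-- A's sort_key returns the tuple (0, int(x)) or (1, x): ported as sorted2's two key
-- components; the heterogeneous second component (int or str) becomes Lex (Int × String)
-- with the unused slot inert ("" among digit keys, 0 among non-digit keys), which compares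
-- exactly as Python compares the tuples that actually meet.
-- int(x) is only reached when x.isdigit(), where it parses: `(… ).getD 0` is exact there.
def pvK1 (x : String) : Int := if PySem.Str.strIsdigit x then 0 else 1
def pvK2 (x : String) : Lex (Int × String) :=
  if PySem.Str.strIsdigit x then toLex ((PySem.Int.ofStr? x).getD 0, "")
  else toLex (0, x)

def get_years (rows : List (List (String × String))) : List String :=
  let years : PySem.Set String :=
    PySem.Set.ofList ((rows.map pvYearOf).filter (fun y => y != ""))
  PySem.List.sorted2 years pvK1 pvK2 false

-- ===== PORT B =====
-- B's key(x) = (0, int(x)) or (1, x), split into its two components; the heterogeneous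
-- second slot (int or str) is Lex (Int × String) with the unused slot inert ("" for digit
-- keys, 0 for the rest), exact for every comparison B performs (equal first components ⇒
-- same kind); int(x) is only reached when x.isdigit(), where `(… ).getD 0` is exact.
def pvKB1 (x : String) : Int := if PySem.Str.strIsdigit x then 0 else 1
def pvKB2 (x : String) : Lex (Int × String) :=
  if PySem.Str.strIsdigit x then toLex ((PySem.Int.ofStr? x).getD 0, "")
  else toLex ((0 : Int), x)
-- Python's tuple comparison key(a) < key(b), written out lexicographically
def pvKeyLt (a b : String) : Bool :=
  decide (pvKB1 a < pvKB1 b) || (pvKB1 a == pvKB1 b && decide (pvKB2 a < pvKB2 b))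

-- B's inner while/insert: advance past keys < key(y), skip if the stop element is y,
-- otherwise insert y there (B's index loop transcribed as recursion over `out`)
def pvInsert (y : String) : List String → List String
  | [] => [y]
  | a :: rest =>
    if pvKeyLt a y then a :: pvInsert y rest
    else if a == y then a :: rest
    else y :: a :: rest

def get_years_alt (rows : List (List (String × String))) : List String :=
  rows.foldl (fun out row =>
    let y := PySem.Str.strip ((PySem.Dict.mk row).getD "TAHUN" "")
    if y != "" then pvInsert y out else out) []

-- ===== PRECONDITION & SPEC =====
-- Pre_ excludes inputs whose stripped year values contain two distinct digit strings with the
-- same integer value (e.g. "7" and "07"): there A's (and B's) order among them is the accidental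
-- hash-iteration order of a Python set, which no port can reproduce.
def Pre_get_years (rows : List (List (String × String))) : Prop :=
  ∀ a ∈ rows.map pvYearOf, ∀ b ∈ rows.map pvYearOf,
    a ≠ b → PySem.Str.strIsdigit a = true → PySem.Str.strIsdigit b = true →
      (PySem.Int.ofStr? a).getD 0 ≠ (PySem.Int.ofStr? b).getD 0
instance (rows : List (List (String × String))) : Decidable (Pre_get_years rows) := by
  unfold Pre_get_years; infer_instance

def pvWitness_get_years : (List (List (String × String))) :=
  [[("TAHUN", " 2020 ")], [("TAHUN", "abc")], [("TAHUN", "7")], [("x", "1999")]]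

def Spec_get_years (rows : List (List (String × String))) (out : List String) : Prop := out = get_years_alt rows
instance (rows : List (List (String × String))) (out : List String) : Decidable (Spec_get_years rows out) := by unfold Spec_get_years; infer_instance

-- ===== CLAIM (what is proved, stated in full; the proofs are below) =====
def Claim_equal_get_years : Prop := ∀ (rows : List (List (String × String))), Dom_get_years rows → Pre_get_years rows → Spec_get_years rows (get_years rows)

-- ===== LEMMAS AND PROOFS =====

-- proof-side combined key: A's tuple (pvK1 x, pvK2 x) as one lexicographic value
def pvKeyB (x : String) : Lex (Int × Lex (Int × String)) := toLex (pvK1 x, pvK2 x)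

theorem pvKeyB_eq (x : String) : pvKeyB x = toLex (pvK1 x, pvK2 x) := rfl

-- B's Bool comparison decides the combined key order
theorem pvKeyLt_eq (a b : String) : pvKeyLt a b = decide (pvKeyB a < pvKeyB b) := by
  have h1 : pvKB1 = pvK1 := rfl
  have h2 : pvKB2 = pvK2 := rfl
  rw [pvKeyLt, h1, h2, pvKeyB, pvKeyB]
  rw [show (decide (pvK1 a < pvK1 b) || (pvK1 a == pvK1 b && decide (pvK2 a < pvK2 b)))
      = decide (pvK1 a < pvK1 b ∨ pvK1 a = pvK1 b ∧ pvK2 a < pvK2 b) by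
    by_cases ha : pvK1 a < pvK1 b <;> by_cases hb : pvK1 a = pvK1 b <;>
      by_cases hc : pvK2 a < pvK2 b <;> simp [ha, hb, hc]]
  rw [decide_eq_decide]
  simp only [Prod.Lex.toLex_lt_toLex]

-- sorted2 under (pvK1, pvK2) is sorted under the combined lexicographic key
theorem pvSorted2_eq_sorted (xs : List String) :
    PySem.List.sorted2 xs pvK1 pvK2 false = PySem.List.sorted xs pvKeyB false := by
  rw [PySem.List.sorted_eq_foldl_insertBy]
  show xs.foldl (fun acc x => PySem.List.insertBy
      (fun a b => decide (pvK1 a < pvK1 b) || (!decide (pvK1 b < pvK1 a) && decide (pvK2 a < pvK2 b)))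
      x acc) []
    = xs.foldl (fun acc x => PySem.List.insertBy (fun a b => decide (pvKeyB a < pvKeyB b)) x acc) []
  have hfun : (fun (a b : String) => decide (pvK1 a < pvK1 b)
      || (!decide (pvK1 b < pvK1 a) && decide (pvK2 a < pvK2 b)))
      = fun a b => decide (pvKeyB a < pvKeyB b) := by
    funext a b
    rw [show (decide (pvK1 a < pvK1 b) || (!decide (pvK1 b < pvK1 a) && decide (pvK2 a < pvK2 b)))
        = decide (pvK1 a < pvK1 b ∨ ¬(pvK1 b < pvK1 a) ∧ pvK2 a < pvK2 b) by
          by_cases h1 : pvK1 a < pvK1 b <;> by_cases h2 : pvK1 b < pvK1 a <;>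
            by_cases h3 : pvK2 a < pvK2 b <;> simp [h1, h2, h3],
      decide_eq_decide]
    rw [pvKeyB_eq a, pvKeyB_eq b]
    simp only [Prod.Lex.toLex_lt_toLex]
    constructor
    · rintro (h | ⟨h1, h2⟩)
      · exact Or.inl h
      · by_cases h0 : pvK1 a < pvK1 b
        · exact Or.inl h0
        · exact Or.inr ⟨le_antisymm (not_lt.mp h1) (not_lt.mp h0), h2⟩
    · rintro (h | ⟨h1, h2⟩)
      · exact Or.inl h
      · exact Or.inr ⟨by simp [h1], h2⟩
  rw [hfun]

-- distinct strings whose digit values (when both are digit strings) differ have distinct keys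
theorem pvKey_ne {a b : String} (h : a ≠ b)
    (hd : PySem.Str.strIsdigit a = true → PySem.Str.strIsdigit b = true →
      (PySem.Int.ofStr? a).getD 0 ≠ (PySem.Int.ofStr? b).getD 0) :
    pvKeyB a ≠ pvKeyB b := by
  simp only [pvKeyB, pvK1, pvK2]
  by_cases ha : PySem.Str.strIsdigit a <;> by_cases hb : PySem.Str.strIsdigit b <;>
    simp only [if_pos, ha, hb, Bool.false_eq_true, if_false] <;>
    simp [Prod.ext_iff, h]
  exact hd ha hb

-- one insertion: preserves strict sortedness in pvKeyB and adds y to the members,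
-- provided y's key clashes with no other member's key
theorem pvInsert_spec (y : String) (out : List String)
    (hp : out.Pairwise (fun a b => pvKeyB a < pvKeyB b))
    (hinj : ∀ a ∈ out, a ≠ y → pvKeyB a ≠ pvKeyB y) :
    (pvInsert y out).Pairwise (fun a b => pvKeyB a < pvKeyB b)
    ∧ ∀ x, (x ∈ pvInsert y out ↔ x = y ∨ x ∈ out) := by
  induction out with
  | nil => simp [pvInsert]
  | cons a rest ih =>
    rw [List.pairwise_cons] at hp
    by_cases hlt : pvKeyB a < pvKeyB y
    · have ⟨ihp, ihm⟩ := ih hp.2 (fun c hc => hinj c (List.mem_cons_of_mem a hc))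
      simp only [pvInsert, pvKeyLt_eq, hlt, decide_true, if_pos]
      constructor
      · rw [List.pairwise_cons]
        exact ⟨fun c hc => by
          rcases (ihm c).mp hc with h | h
          · subst h; exact hlt
          · exact hp.1 c h, ihp⟩
      · intro x; simp [ihm x]; tauto
    · by_cases heq : a = y
      · subst heq
        have hins : pvInsert a (a :: rest) = a :: rest := by simp [pvInsert, pvKeyLt_eq]
        rw [hins]
        exact ⟨List.pairwise_cons.mpr hp, fun x => by simp⟩
      · have hgt : pvKeyB y < pvKeyB a :=
          lt_of_le_of_ne (not_lt.mp hlt) (Ne.symm (hinj a List.mem_cons_self heq))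
        have hins : pvInsert y (a :: rest) = y :: a :: rest := by
          simp [pvInsert, pvKeyLt_eq, hlt, heq]
        rw [hins]
        refine ⟨?_, fun x => by simp⟩
        rw [List.pairwise_cons]
        refine ⟨fun c hc => ?_, List.pairwise_cons.mpr hp⟩
        rcases List.mem_cons.mp hc with h | h
        · subst h; exact hgt
        · exact lt_trans hgt (hp.1 c h)

-- the whole pass: the accumulator stays strictly sorted and holds exactly the
-- non-empty years seen so far (plus what it started with)
theorem pvFold_spec (S : List String)
    (hinj : ∀ a ∈ S, ∀ b ∈ S, a ≠ b → pvKeyB a ≠ pvKeyB b) :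
    ∀ (rs : List (List (String × String))) (acc : List String),
    (∀ row ∈ rs, pvYearOf row ∈ S) → (∀ x ∈ acc, x ∈ S) →
    acc.Pairwise (fun a b => pvKeyB a < pvKeyB b) →
    (rs.foldl (fun out row =>
        let y := PySem.Str.strip ((PySem.Dict.mk row).getD "TAHUN" "")
        if y != "" then pvInsert y out else out) acc).Pairwise
      (fun a b => pvKeyB a < pvKeyB b)
    ∧ ∀ x, (x ∈ rs.foldl (fun out row =>
        let y := PySem.Str.strip ((PySem.Dict.mk row).getD "TAHUN" "")
        if y != "" then pvInsert y out else out) acc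
      ↔ x ∈ acc ∨ (x ∈ rs.map pvYearOf ∧ x ≠ "")) := by
  intro rs
  induction rs with
  | nil => intro acc _ _ hp; exact ⟨hp, fun x => by simp⟩
  | cons row rest ih =>
    intro acc hrows hacc hp
    simp only [List.foldl_cons]
    by_cases hy : pvYearOf row != ""
    · have hyS : pvYearOf row ∈ S := hrows row List.mem_cons_self
      have ⟨hip, him⟩ := pvInsert_spec (pvYearOf row) acc hp
        (fun a ha hne => hinj a (hacc a ha) _ hyS hne)
      have hrec := ih (pvInsert (pvYearOf row) acc)
        (fun r hr => hrows r (List.mem_cons_of_mem row hr))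
        (fun x hx => by rcases (him x).mp hx with h | h; · subst h; exact hyS
                        · exact hacc x h) hip
      have harg : (let y := PySem.Str.strip ((PySem.Dict.mk row).getD "TAHUN" "")
          if y != "" then pvInsert y acc else acc) = pvInsert (pvYearOf row) acc := by
        simp only [pvYearOf] at hy ⊢
        simp [hy]
      rw [harg]
      refine ⟨hrec.1, fun x => ?_⟩
      rw [hrec.2 x, him x]
      have hne : pvYearOf row ≠ "" := by simpa using hy
      constructor
      · rintro ((h | h) | h)
        · exact Or.inr ⟨by rw [List.map_cons, List.mem_cons]; exact Or.inl h, h ▸ hne⟩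
        · exact Or.inl h
        · exact Or.inr ⟨by rw [List.map_cons, List.mem_cons]; exact Or.inr h.1, h.2⟩
      · rintro (h | ⟨h, hx⟩)
        · exact Or.inl (Or.inr h)
        · rw [List.map_cons, List.mem_cons] at h
          rcases h with h | h
          · exact Or.inl (Or.inl h)
          · exact Or.inr ⟨h, hx⟩
    · have harg : (let y := PySem.Str.strip ((PySem.Dict.mk row).getD "TAHUN" "")
          if y != "" then pvInsert y acc else acc) = acc := by
        simp only [pvYearOf] at hy
        simp at hy
        simp [hy]
      rw [harg]
      have := ih acc (fun r hr => hrows r (List.mem_cons_of_mem row hr)) hacc hp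
      refine ⟨this.1, fun x => ?_⟩
      rw [this.2 x]
      have hye : pvYearOf row = "" := by simpa using hy
      constructor
      · rintro (h | h)
        · exact Or.inl h
        · exact Or.inr ⟨by rw [List.map_cons, List.mem_cons]; exact Or.inr h.1, h.2⟩
      · rintro (h | ⟨h, hx⟩)
        · exact Or.inl h
        · rw [List.map_cons, List.mem_cons] at h
          rcases h with h | h
          · exact absurd (h.trans hye) hx
          · exact Or.inr ⟨h, hx⟩

-- ===== VERDICT (by name: the statement is the Claim_ definition above) =====
theorem get_years_spec : Claim_equal_get_years := by
  intro rows _ hpre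
  show get_years rows = get_years_alt rows
  unfold get_years get_years_alt
  rw [pvSorted2_eq_sorted]
  set l : List String := PySem.Set.ofList ((rows.map pvYearOf).filter (fun y => y != "")) with hl
  have hinj : ∀ a ∈ rows.map pvYearOf, ∀ b ∈ rows.map pvYearOf, a ≠ b →
      pvKeyB a ≠ pvKeyB b :=
    fun a ha b hb hne => pvKey_ne hne (fun hda hdb => hpre a ha b hb hne hda hdb)
  have ⟨hp, hm⟩ := pvFold_spec (rows.map pvYearOf) hinj rows []
    (fun row hr => List.mem_map_of_mem hr) (by simp) (by simp)
  refine PySem.List.sorted_eq_of_perm_of_pairwise_lt _ _ _ ?_ hp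
  have hnd : (rows.foldl (fun out row =>
      let y := PySem.Str.strip ((PySem.Dict.mk row).getD "TAHUN" "")
      if y != "" then pvInsert y out else out) []).Nodup :=
    hp.imp (fun {a b} (hlt : pvKeyB a < pvKeyB b) =>
      (fun (heq : a = b) => absurd (heq ▸ hlt) (lt_irrefl _) : a ≠ b))
  rw [List.perm_ext_iff_of_nodup hnd (PySem.Set.nodup_ofList _)]
  intro x
  rw [hm x, PySem.Set.mem_ofList, List.mem_filter]
  simp
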